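-- pv_equiv track=rewrite | github.com/herm1k/LetItGo | letitgo.py | _guess_csv_column
-- ===== SOURCE A (Python) =====
-- from typing import Iterable, Optional
--
-- def _guess_csv_column(fieldnames: Iterable[str]) -> Optional[str]:
--     candidates = [name.strip() for name in fieldnames]
--     preferred = ["domain", "hostname", "host", "fqdn", "name", "target"]
--     lowered = {name.lower(): name for name in candidates}
--     for item in preferred:
--         if item in lowered:
--             return lowered[item]
--     return candidates[0] if candidates else None
-- ===== SOURCE B (Python) =====
-- def _guess_csv_column(fieldnames):
--     preferred = ["domain", "hostname", "host", "fqdn", "name", "target"]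
--     candidates = [name.strip() for name in fieldnames]
--     best_rank, best = len(preferred), None
--     for name in candidates:
--         try:
--             rank = preferred.index(name.lower())
--         except ValueError:
--             continue
--         if rank <= best_rank:
--             best_rank, best = rank, name
--     if best is not None:
--         return best
--     return candidates[0] if candidates else None
-- ===== Notes on version B (the rewrite author's own statement) =====
-- stated objective: alternative
-- what changed: Replaces A's key-driven lookup (build a lowered-name dict, then probe the six preferred keys in order) with a candidate-driven single selection pass: each candidate gets a preference rank via preferred.index of its lowercase, and the pass keeps the best (lowest) rank, later candidates winning ties, with the same first-candidate fallback.
import Mathlib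
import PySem

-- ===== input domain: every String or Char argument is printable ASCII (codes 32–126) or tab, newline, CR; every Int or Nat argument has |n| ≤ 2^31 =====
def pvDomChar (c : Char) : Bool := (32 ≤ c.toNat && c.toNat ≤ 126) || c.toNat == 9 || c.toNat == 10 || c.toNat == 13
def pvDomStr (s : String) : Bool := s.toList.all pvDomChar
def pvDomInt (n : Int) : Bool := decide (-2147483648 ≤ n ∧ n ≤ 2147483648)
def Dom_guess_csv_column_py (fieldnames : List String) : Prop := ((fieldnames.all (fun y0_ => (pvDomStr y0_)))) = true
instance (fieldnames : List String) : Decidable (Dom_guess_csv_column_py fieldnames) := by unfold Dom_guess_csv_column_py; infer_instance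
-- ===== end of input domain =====

-- B replaces A's lowered-name dict + key probing by a single candidate-driven pass selecting the best preference rank (ties: last wins); same result, alternative algorithm.


-- ===== PORT A =====
-- A's loop over `preferred`: return lowered[item] at the first item present in the dict
def pvALoop (lowered : PySem.Dict String String) : List String → Option String
  | [] => none
  | p :: ps => if lowered.contains p then lowered.get? p else pvALoop lowered ps

def guess_csv_column_py (fieldnames : List String) : Option String :=
  let candidates := fieldnames.map (fun name => PySem.Str.strip name)
  let lowered := candidates.foldl (fun d name => d.insert (PySem.Str.lower name) name) PySem.Dict.empty
  match pvALoop lowered ["domain", "hostname", "host", "fqdn", "name", "target"] with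
  | some v => some v
  | none => match candidates with
            | [] => none
            | c :: _ => some c

-- ===== PORT B =====
def pvPreferred : List String := ["domain", "hostname", "host", "fqdn", "name", "target"]

-- B's loop body: rank = preferred.index(name.lower()) (skip on ValueError); keep (rank, name) if rank <= best_rank
def pvBStep (s : Nat × Option String) (name : String) : Nat × Option String :=
  match PySem.List.index? pvPreferred (PySem.Str.lower name) with
  | none => s
  | some rank => if rank ≤ s.1 then (rank, some name) else s

def guess_csv_column_py_alt (fieldnames : List String) : Option String :=
  let candidates := fieldnames.map (fun name => PySem.Str.strip name)
  let best := candidates.foldl pvBStep (pvPreferred.length, none)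
  match best.2 with
  | some v => some v
  | none => match candidates with
            | [] => none
            | c :: _ => some c

-- ===== PRECONDITION & SPEC =====
def Spec_guess_csv_column_py (fieldnames : List String) (out : Option String) : Prop := out = guess_csv_column_py_alt fieldnames
instance (fieldnames : List String) (out : Option String) : Decidable (Spec_guess_csv_column_py fieldnames out) := by unfold Spec_guess_csv_column_py; infer_instance

-- ===== CLAIM (what is proved, stated in full; the proofs are below) =====
def Claim_equal_guess_csv_column_py : Prop := ∀ (fieldnames : List String), Dom_guess_csv_column_py fieldnames → Spec_guess_csv_column_py fieldnames (guess_csv_column_py fieldnames)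

-- ===== LEMMAS AND PROOFS =====

-- proof-side bridge: the last candidate whose lowercase equals `item`
def pvBScan (item : String) (candidates : List String) : Option String :=
  candidates.foldl (fun found name => if PySem.Str.lower name == item then some name else found) none

-- proof-side bridge: first preferred key with a non-none scan
def pvBLoop (candidates : List String) : List String → Option String
  | [] => none
  | p :: ps => match pvBScan p candidates with
               | some v => some v
               | none => pvBLoop candidates ps

def pvPref (i : Nat) : String := pvPreferred.getD i ""

-- the dict lookup at k equals the last-match scan, threading the accumulator
theorem pvGet_foldl_insert (k : String) : ∀ (l : List String) (d : PySem.Dict String String),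
    (l.foldl (fun d name => d.insert (PySem.Str.lower name) name) d).get? k
      = l.foldl (fun found name => if PySem.Str.lower name == k then some name else found) (d.get? k) := by
  intro l
  induction l with
  | nil => intro d; rfl
  | cons x xs ih =>
      intro d
      simp only [List.foldl_cons, ih, PySem.Dict.get?_insert]
      by_cases h : PySem.Str.lower x = k
      · simp [h]
      · simp [h, beq_iff_eq, Ne.symm h]

theorem pvScan_eq (candidates : List String) (k : String) :
    (candidates.foldl (fun d name => d.insert (PySem.Str.lower name) name) PySem.Dict.empty).get? k
      = pvBScan k candidates := by
  rw [pvGet_foldl_insert]; rfl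

theorem pvLoop_eq (candidates : List String) : ∀ (ps : List String),
    pvALoop (candidates.foldl (fun d name => d.insert (PySem.Str.lower name) name) PySem.Dict.empty) ps
      = pvBLoop candidates ps := by
  intro ps
  induction ps with
  | nil => rfl
  | cons p ps ih =>
      simp only [pvALoop, pvBLoop, PySem.Dict.contains_eq_isSome_get?, pvScan_eq, ← ih]
      cases h : pvBScan p candidates <;> simp_all

theorem pvScan_append (p c : String) (cs : List String) :
    pvBScan p (cs ++ [c]) = if PySem.Str.lower c == p then some c else pvBScan p cs := by
  simp [pvBScan, List.foldl_append]

theorem pvPref_mem {i : Nat} (h : i < 6) : pvPref i ∈ pvPreferred := by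
  unfold pvPref
  interval_cases i <;> simp [pvPreferred]

theorem pvIndex_some {x : String} {r : Nat} (h : PySem.List.index? pvPreferred x = some r) :
    r < 6 ∧ pvPref r = x ∧ ∀ j, j < 6 → j ≠ r → pvPref j ≠ x := by
  obtain ⟨hr, hget, hbefore⟩ := PySem.List.getElem_of_index?_eq_some h
  have hl : pvPreferred.length = 6 := rfl
  have hnd : pvPreferred.Nodup := by decide
  have hpref : ∀ j (hj : j < 6), pvPref j = pvPreferred[j] := by
    intro j hj
    unfold pvPref
    rw [List.getD_eq_getElem?_getD, List.getElem?_eq_getElem (by omega)]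
    rfl
  refine ⟨by omega, by rw [hpref r (by omega)]; exact hget, ?_⟩
  intro j hj hne hx
  rw [hpref j hj] at hx
  have := hnd.getElem_inj_iff.mp (hx.trans hget.symm)
  exact hne this

theorem pvIndex_none {x : String} (h : PySem.List.index? pvPreferred x = none) :
    ∀ j, j < 6 → pvPref j ≠ x := by
  intro j hj hx
  have hmem : x ∈ pvPreferred := hx ▸ pvPref_mem hj
  rw [PySem.List.index?_eq_none_iff] at h
  exact h hmem

-- loop invariant of B's selection pass, by snoc induction over the candidates
theorem pvInv : ∀ cs : List String,
    (cs.foldl pvBStep (6, none)).1 ≤ 6 ∧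
    (∀ i, i < (cs.foldl pvBStep (6, none)).1 → i < 6 → pvBScan (pvPref i) cs = none) ∧
    ((cs.foldl pvBStep (6, none)).1 < 6 →
        (cs.foldl pvBStep (6, none)).2 = pvBScan (pvPref (cs.foldl pvBStep (6, none)).1) cs ∧
        ((cs.foldl pvBStep (6, none)).2).isSome) ∧
    ((cs.foldl pvBStep (6, none)).1 = 6 → (cs.foldl pvBStep (6, none)).2 = none) := by
  intro cs
  induction cs using List.reverseRecOn with
  | nil => refine ⟨le_refl _, ?_, ?_, ?_⟩ <;> simp [pvBScan]
  | append_singleton cs c ih =>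
      obtain ⟨ih1, ih2, ih3, ih4⟩ := ih
      rw [List.foldl_append]
      simp only [List.foldl_cons, List.foldl_nil]
      cases hidx : PySem.List.index? pvPreferred (PySem.Str.lower c) with
      | none =>
          have hne := pvIndex_none hidx
          have hscan : ∀ i, i < 6 → pvBScan (pvPref i) (cs ++ [c]) = pvBScan (pvPref i) cs := by
            intro i hi
            rw [pvScan_append]
            have hne' : PySem.Str.lower c ≠ pvPref i := fun h => hne i hi h.symm
            simp [beq_iff_eq, hne']
          simp only [pvBStep, hidx]
          refine ⟨ih1, ?_, ?_, ih4⟩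
          · intro i hi hi6; rw [hscan i hi6]; exact ih2 i hi hi6
          · intro hlt
            obtain ⟨h1, h2⟩ := ih3 hlt
            exact ⟨by rw [hscan _ hlt]; exact h1, h2⟩
      | some r =>
          obtain ⟨hr6, hpr, hother⟩ := pvIndex_some hidx
          have hscan_ne : ∀ i, i < 6 → i ≠ r → pvBScan (pvPref i) (cs ++ [c]) = pvBScan (pvPref i) cs := by
            intro i hi hne
            rw [pvScan_append]
            have hne' : PySem.Str.lower c ≠ pvPref i := fun h => hother i hi hne h.symm
            simp [beq_iff_eq, hne']
          have hscan_r : pvBScan (pvPref r) (cs ++ [c]) = some c := by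
            rw [pvScan_append]
            simp [hpr]
          simp only [pvBStep, hidx]
          by_cases hle : r ≤ (cs.foldl pvBStep (6, none)).1
          · rw [if_pos hle]
            refine ⟨by omega, ?_, ?_, by omega⟩
            · intro i hi hi6
              rw [hscan_ne i hi6 (by omega)]
              exact ih2 i (by omega) hi6
            · intro _
              exact ⟨hscan_r.symm, rfl⟩
          · rw [if_neg hle]
            have hlt : (cs.foldl pvBStep (6, none)).1 < 6 := by omega
            obtain ⟨h1, h2⟩ := ih3 hlt
            refine ⟨ih1, ?_, ?_, by omega⟩
            · intro i hi hi6
              rw [hscan_ne i hi6 (by omega)]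
              exact ih2 i hi hi6
            · intro _
              exact ⟨by rw [hscan_ne _ hlt (by omega)]; exact h1, h2⟩

theorem pvFold_eq_loop (cs : List String) :
    pvBLoop cs pvPreferred = (cs.foldl pvBStep (6, none)).2 := by
  obtain ⟨h1, h2, h3, h4⟩ := pvInv cs
  rcases hfs : cs.foldl pvBStep (6, none) with ⟨k, b⟩
  rw [hfs] at h1 h2 h3 h4
  simp only at h1 h2 h3 h4
  show pvBLoop cs pvPreferred = b
  simp only [pvPreferred, pvBLoop]
  have z0 : 0 < k → pvBScan "domain" cs = none := fun h => h2 0 h (by omega)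
  have z1 : 1 < k → pvBScan "hostname" cs = none := fun h => h2 1 h (by omega)
  have z2 : 2 < k → pvBScan "host" cs = none := fun h => h2 2 h (by omega)
  have z3 : 3 < k → pvBScan "fqdn" cs = none := fun h => h2 3 h (by omega)
  have z4 : 4 < k → pvBScan "name" cs = none := fun h => h2 4 h (by omega)
  have z5 : 5 < k → pvBScan "target" cs = none := fun h => h2 5 h (by omega)
  interval_cases k
  · have hv : b = pvBScan "domain" cs := (h3 (by omega)).1
    obtain ⟨v, hbv⟩ := Option.isSome_iff_exists.mp (h3 (by omega)).2
    simp [← hv, hbv]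
  · have hv : b = pvBScan "hostname" cs := (h3 (by omega)).1
    obtain ⟨v, hbv⟩ := Option.isSome_iff_exists.mp (h3 (by omega)).2
    simp [z0 (by omega), ← hv, hbv]
  · have hv : b = pvBScan "host" cs := (h3 (by omega)).1
    obtain ⟨v, hbv⟩ := Option.isSome_iff_exists.mp (h3 (by omega)).2
    simp [z0 (by omega), z1 (by omega), ← hv, hbv]
  · have hv : b = pvBScan "fqdn" cs := (h3 (by omega)).1
    obtain ⟨v, hbv⟩ := Option.isSome_iff_exists.mp (h3 (by omega)).2
    simp [z0 (by omega), z1 (by omega), z2 (by omega), ← hv, hbv]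
  · have hv : b = pvBScan "name" cs := (h3 (by omega)).1
    obtain ⟨v, hbv⟩ := Option.isSome_iff_exists.mp (h3 (by omega)).2
    simp [z0 (by omega), z1 (by omega), z2 (by omega), z3 (by omega), ← hv, hbv]
  · have hv : b = pvBScan "target" cs := (h3 (by omega)).1
    obtain ⟨v, hbv⟩ := Option.isSome_iff_exists.mp (h3 (by omega)).2
    simp [z0 (by omega), z1 (by omega), z2 (by omega), z3 (by omega), z4 (by omega), ← hv, hbv]
  · simp [z0 (by omega), z1 (by omega), z2 (by omega), z3 (by omega), z4 (by omega),
      z5 (by omega), h4 rfl]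

-- ===== VERDICT (by name: the statement is the Claim_ definition above) =====
theorem guess_csv_column_py_spec : Claim_equal_guess_csv_column_py := by
  intro fieldnames _
  unfold Spec_guess_csv_column_py guess_csv_column_py guess_csv_column_py_alt
  simp only [pvLoop_eq,
    show (["domain", "hostname", "host", "fqdn", "name", "target"] : List String) = pvPreferred from rfl,
    show pvPreferred.length = 6 from rfl, pvFold_eq_loop]
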